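-- pv_equiv track=rewrite | github.com/TCollier0830/DiscreteMath | GRAPH/GRAPH.py | Existence
-- ===== SOURCE A (Python) =====
-- def Existence(deg_seq):
--     #Corollary of of Theorem 1.1 is that an odd degree sequence can't define a graph.
--     if sum(deg_seq) % 2:
--         return False
--     #Theorem proved in class
--     for k in range(1,len(deg_seq) + 1):
--         left = sum(deg_seq[:k])
--         right =  k * (k-1) + sum([min(x,k) for x in deg_seq[k:]])
--         if left > right:
--             return False
--     return True
-- ===== SOURCE B (Python) =====
-- def Existence(deg_seq):
--     # One backward pass: maintain T(k)=sum(min(x,k) for x in deg_seq[k:]) and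
--     # B(k)=#{i>=k: d_i>=k} by recurrences, with a bucket counter of clamped values.
--     n = len(deg_seq)
--     total = sum(deg_seq)
--     if total % 2:
--         return False
--     cnt = [0] * (n + 1)
--     t = 0       # T(k+1)
--     b = 0       # B(k+1)
--     left = total
--     ok = total <= n * (n - 1)   # the k = n inequality (empty suffix)
--     for k in range(n - 1, 0, -1):
--         v = deg_seq[k]
--         vc = v if v < n else n
--         t = min(vc, k) + t - b
--         b = b + (1 if vc >= k else 0) + cnt[k]
--         if 1 <= vc:
--             cnt[vc] += 1
--         left -= v
--         if left > k * (k - 1) + t: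
--             ok = False
--     return ok
-- ===== Notes on version B (the rewrite author's own statement) =====
-- stated objective: alternative
-- what changed: Replaced the per-k rescans of the prefix and of the min-clamped suffix by a single backward pass that maintains the suffix min-sum and the count of suffix degrees >= k through recurrences, using a bucket counter of value-clamped degrees.
import Mathlib
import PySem

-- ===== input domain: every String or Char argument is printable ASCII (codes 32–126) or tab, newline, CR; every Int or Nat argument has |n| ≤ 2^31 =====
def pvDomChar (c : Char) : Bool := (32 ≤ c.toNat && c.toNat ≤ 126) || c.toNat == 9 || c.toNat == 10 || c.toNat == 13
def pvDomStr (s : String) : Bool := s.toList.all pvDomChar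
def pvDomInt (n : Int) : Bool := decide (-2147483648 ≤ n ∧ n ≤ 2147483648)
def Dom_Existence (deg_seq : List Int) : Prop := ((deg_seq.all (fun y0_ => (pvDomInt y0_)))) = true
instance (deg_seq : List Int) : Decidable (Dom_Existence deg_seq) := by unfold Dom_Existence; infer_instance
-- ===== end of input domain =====

-- B replaces A's per-k rescans of the prefix and the min-clamped suffix by a single
-- backward pass maintaining them through recurrences (an alternative algorithm).

-- ===== PORT A =====
-- the 'for k in range(1, len(deg_seq)+1)' loop with its early return
def existenceLoopA (deg : List Int) : List Int → Bool
  | [] => true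
  | k :: ks =>
    let left := (PySem.List.slice deg none (some k)).sum
    let right := k * (k - 1) + ((PySem.List.slice deg (some k) none).map (fun x => min x k)).sum
    if right < left then false
    else existenceLoopA deg ks

def Existence (deg_seq : List Int) : Bool :=
  if PySem.Int.mod deg_seq.sum 2 ≠ 0 then false
  else existenceLoopA deg_seq (PySem.List.pyRange 1 ((deg_seq.length : Int) + 1) 1)

-- ===== PORT B =====
-- the 'for k in range(n-1, 0, -1)' loop of Source B as a countdown recursion on k;
-- every deg_seq[k] / cnt[...] access is at a provably in-range index, so List.getD is exact
def existenceLoopB (deg : List Int) (n : Nat) : Nat → List Int → Int → Int → Int → Bool → Bool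
  | 0, _cnt, _t, _b, _left, ok => ok
  | k + 1, cnt, t, b, left, ok =>
    let kk : Int := ((k + 1 : Nat) : Int)
    let v := deg.getD (k + 1) 0
    let vc := if v < (n : Int) then v else (n : Int)
    let t' := min vc kk + t - b
    let b' := b + (if kk ≤ vc then 1 else 0) + cnt.getD (k + 1) 0
    let cnt' := if 1 ≤ vc then cnt.set vc.toNat (cnt.getD vc.toNat 0 + 1) else cnt
    let left' := left - v
    let ok' := if kk * (kk - 1) + t' < left' then false else ok
    existenceLoopB deg n k cnt' t' b' left' ok'

def Existence_alt (deg_seq : List Int) : Bool :=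
  let n := deg_seq.length
  let total := deg_seq.sum
  if PySem.Int.mod total 2 ≠ 0 then false
  else existenceLoopB deg_seq n (n - 1) (List.replicate (n + 1) 0) 0 0 total
        (decide (total ≤ (n : Int) * ((n : Int) - 1)))

-- ===== PRECONDITION & SPEC =====
def Spec_Existence (deg_seq : List Int) (out : Bool) : Prop := out = Existence_alt deg_seq
instance (deg_seq : List Int) (out : Bool) : Decidable (Spec_Existence deg_seq out) := by unfold Spec_Existence; infer_instance

-- ===== CLAIM (what is proved, stated in full; the proofs are below) =====
def Claim_equal_Existence : Prop := ∀ (deg_seq : List Int), Dom_Existence deg_seq → Spec_Existence deg_seq (Existence deg_seq)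

-- ===== LEMMAS AND PROOFS =====

-- the k-th Erdős–Gallai inequality, exactly as both programs test it
def condB (deg : List Int) (k : Nat) : Bool :=
  decide ((deg.take k).sum ≤ (k : Int) * ((k : Int) - 1) + ((deg.drop k).map (fun x => min x (k : Int))).sum)

-- common normal form of both programs: parity plus all n inequalities
def goodB (deg : List Int) : Bool :=
  (PySem.Int.mod deg.sum 2 == 0) && (List.range deg.length).all (fun i => condB deg (i + 1))

-- invariant for Source B's bucket counter cnt over the current suffix
def CntOk (deg : List Int) (n : Nat) (cnt : List Int) (m : Nat) : Prop :=
  cnt.length = n + 1 ∧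
    ∀ j : Nat, 1 ≤ j → j ≤ n →
      cnt.getD j 0 = ((deg.drop m).countP (fun x => min x (n : Int) = (j : Int)) : Int)

lemma minsum_pred (l : List Int) (m : Int) :
    (l.map (fun x => min x m)).sum
      = (l.map (fun x => min x (m + 1))).sum - (l.countP (fun x => m < x) : Int) := by
  induction l with
  | nil => simp
  | cons x xs ih =>
    simp only [List.map_cons, List.sum_cons, List.countP_cons, ih]
    by_cases h : m < x <;> simp [h] <;> push_cast <;> omega

lemma countP_ge_split (l : List Int) (m : Int) :
    (l.countP (fun x => m ≤ x) : Int)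
      = (l.countP (fun x => m < x) : Int) + (l.countP (fun x => x = m) : Int) := by
  induction l with
  | nil => simp
  | cons x xs ih =>
    simp only [List.countP_cons, ih]
    by_cases h1 : m ≤ x <;> by_cases h2 : m < x <;> by_cases h3 : x = m <;>
      simp [h1, h2, h3] <;> push_cast <;> omega

lemma countP_iff (l : List Int) (p q : Int → Prop) [DecidablePred p] [DecidablePred q]
    (h : ∀ x, p x ↔ q x) :
    l.countP (fun x => decide (p x)) = l.countP (fun x => decide (q x)) := by
  apply List.countP_congr
  intro x _
  simp [h x]

lemma getD_set_int (l : List Int) (i : Nat) (a : Int) (j : Nat) (hi : i < l.length) :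
    (l.set i a).getD j 0 = if j = i then a else l.getD j 0 := by
  rw [List.getD_eq_getElem?_getD, List.getD_eq_getElem?_getD, List.getElem?_set]
  by_cases h : i = j
  · subst h
    simp [hi]
  · have h' : ¬ j = i := fun hc => h hc.symm
    simp [h, h']

lemma loopA_range (deg : List Int) :
    ∀ (c a : Nat), existenceLoopA deg (PySem.List.pyRange (a : Int) ((a : Int) + (c : Int)) 1)
      = (List.range c).all (fun i => condB deg (a + i)) := by
  intro c
  induction c with
  | zero =>
    intro a
    rw [PySem.List.pyRange_one_eq_nil (by omega)]
    simp [existenceLoopA]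
  | succ c ih =>
    intro a
    rw [PySem.List.pyRange_one_cons (by push_cast; omega)]
    rw [existenceLoopA]
    simp only [PySem.List.slice_to_natCast, PySem.List.slice_from_natCast]
    have hend : ((a : Int) + ((c + 1 : Nat) : Int)) = (((a + 1 : Nat)) : Int) + ((c : Nat) : Int) := by
      push_cast; ring
    have hrange : ((a : Int) + 1) = ((a + 1 : Nat) : Int) := by push_cast; ring
    rw [hend, hrange, ih (a + 1)]
    have hrhs : (List.range (c + 1)).all (fun i => condB deg (a + i))
        = (condB deg a && (List.range c).all (fun i => condB deg (a + 1 + i))) := by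
      rw [List.range_succ_eq_map]
      simp only [List.all_cons, List.all_map, Nat.add_zero]
      congr 2
      funext i
      simp only [Function.comp_apply]
      congr 1
      omega
    rw [hrhs]
    by_cases h : condB deg a = true
    · have hle := of_decide_eq_true h
      rw [if_neg (not_lt.mpr hle), h, Bool.true_and]
    · have hlt : (a : Int) * ((a : Int) - 1) + ((deg.drop a).map (fun x => min x (a : Int))).sum
          < (deg.take a).sum := by
        by_contra hc
        exact h (decide_eq_true (not_lt.mp hc))
      rw [if_pos hlt, Bool.not_eq_true] at *
      rw [h, Bool.false_and]

lemma loopB_spec (deg : List Int) :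
    ∀ (k : Nat) (cnt : List Int) (ok : Bool), k < deg.length →
      CntOk deg deg.length cnt (k + 1) →
      existenceLoopB deg deg.length k cnt
          (((deg.drop (k + 1)).map (fun x => min x ((k + 1 : Nat) : Int))).sum)
          (((deg.drop (k + 1)).countP (fun x => ((k + 1 : Nat) : Int) ≤ x) : Int))
          ((deg.take (k + 1)).sum) ok
        = (ok && (List.range k).all (fun i => condB deg (i + 1))) := by
  intro k
  induction k with
  | zero => intro cnt ok _ _; simp [existenceLoopB]
  | succ k ih =>
    intro cnt ok hk hcnt
    have hkl : k + 1 < deg.length := hk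
    have hv : deg.getD (k + 1) 0 = deg[k + 1] := List.getD_eq_getElem deg 0 hkl
    set v : Int := deg[k + 1] with hvdef
    have hdrop : deg.drop (k + 1) = v :: deg.drop (k + 1 + 1) := List.drop_eq_getElem_cons hkl
    have hvc : (if v < ((deg.length : Nat) : Int) then v else ((deg.length : Nat) : Int))
        = min v (deg.length : Int) := by split <;> omega
    have ht' : min (min v (deg.length : Int)) ((k + 1 : Nat) : Int)
          + ((deg.drop (k + 1 + 1)).map (fun x => min x ((k + 1 + 1 : Nat) : Int))).sum
          - ((deg.drop (k + 1 + 1)).countP (fun x => ((k + 1 + 1 : Nat) : Int) ≤ x) : Int)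
        = ((deg.drop (k + 1)).map (fun x => min x ((k + 1 : Nat) : Int))).sum := by
      rw [hdrop]
      simp only [List.map_cons, List.sum_cons]
      rw [minsum_pred (deg.drop (k + 1 + 1)) ((k + 1 : Nat) : Int)]
      have e1 : ((k + 1 : Nat) : Int) + 1 = ((k + 1 + 1 : Nat) : Int) := by push_cast; ring
      rw [e1]
      have e2 : (deg.drop (k + 1 + 1)).countP (fun x => decide (((k + 1 : Nat) : Int) < x))
          = (deg.drop (k + 1 + 1)).countP (fun x => decide (((k + 1 + 1 : Nat) : Int) ≤ x)) := by
        apply countP_iff; intro x; push_cast; omega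
      rw [e2]
      have e3 : min (min v (deg.length : Int)) ((k + 1 : Nat) : Int) = min v ((k + 1 : Nat) : Int) := by
        have : (k + 1 : Nat) < deg.length := hkl
        omega
      rw [e3]
      ring
    have hb' : ((deg.drop (k + 1 + 1)).countP (fun x => ((k + 1 + 1 : Nat) : Int) ≤ x) : Int)
          + (if ((k + 1 : Nat) : Int) ≤ min v (deg.length : Int) then 1 else 0)
          + ((deg.drop (k + 1 + 1)).countP (fun x => min x (deg.length : Int) = ((k + 1 : Nat) : Int)) : Int)
        = ((deg.drop (k + 1)).countP (fun x => ((k + 1 : Nat) : Int) ≤ x) : Int) := by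
      rw [hdrop]
      simp only [List.countP_cons]
      push_cast
      rw [countP_ge_split (deg.drop (k + 1 + 1)) ((k : Int) + 1)]
      have e2 : (deg.drop (k + 1 + 1)).countP (fun x => decide ((k : Int) + 1 < x))
          = (deg.drop (k + 1 + 1)).countP (fun x => decide ((k : Int) + 1 + 1 ≤ x)) := by
        apply countP_iff; intro x; omega
      have e4 : (deg.drop (k + 1 + 1)).countP (fun x => decide (min x (deg.length : Int) = (k : Int) + 1))
          = (deg.drop (k + 1 + 1)).countP (fun x => decide (x = (k : Int) + 1)) := by
        apply countP_iff; intro x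
        have : (k + 1 : Nat) < deg.length := hkl
        push_cast at this ⊢
        omega
      rw [e2, e4]
      have hkn2 : ((k + 1 : Nat) : Int) ≤ (deg.length : Int) := by push_cast; omega
      simp only [decide_eq_true_eq]
      split_ifs <;> omega
    have hleft : (deg.take (k + 1 + 1)).sum - v = (deg.take (k + 1)).sum := by
      have h2 : deg.take (k + 1 + 1) = deg.take (k + 1) ++ [v] := by
        rw [List.take_succ, List.getElem?_eq_getElem hkl]
        rfl
      rw [h2]
      simp only [List.sum_append, List.sum_cons, List.sum_nil]
      ring
    obtain ⟨hlen, hval⟩ := hcnt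
    have hcnt' : CntOk deg deg.length
        (if 1 ≤ min v (deg.length : Int)
          then cnt.set (min v (deg.length : Int)).toNat
                (cnt.getD (min v (deg.length : Int)).toNat 0 + 1)
          else cnt) (k + 1) := by
      constructor
      · split <;> simp [hlen]
      · intro j hj1 hjn
        have hcountP : ((deg.drop (k + 1)).countP (fun x => min x ((deg.length : Nat) : Int) = (j : Int)) : Int)
            = ((deg.drop (k + 1 + 1)).countP (fun x => min x ((deg.length : Nat) : Int) = (j : Int)) : Int)
              + (if min v ((deg.length : Nat) : Int) = (j : Int) then 1 else 0) := by
          rw [hdrop]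
          simp only [List.countP_cons]
          by_cases hmv : min v ((deg.length : Nat) : Int) = (j : Int) <;>
            simp [hmv] <;> push_cast <;> ring
        rw [hcountP]
        by_cases hvpos : 1 ≤ min v (deg.length : Int)
        · rw [if_pos hvpos]
          have hmle : (min v (deg.length : Int)).toNat < cnt.length := by
            rw [hlen]; omega
          rw [getD_set_int cnt _ _ j hmle]
          by_cases hj : j = (min v (deg.length : Int)).toNat
          · rw [if_pos hj, ← hj]
            have hjint : (j : Int) = min v (deg.length : Int) := by omega
            rw [hval j hj1 hjn, if_pos hjint.symm]
          · rw [if_neg hj]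
            have hne : ¬ (min v ((deg.length : Nat) : Int) = (j : Int)) := by
              intro hcon
              apply hj
              omega
            rw [hval j hj1 hjn, if_neg hne, add_zero]
        · rw [if_neg hvpos]
          have hne : ¬ (min v ((deg.length : Nat) : Int) = (j : Int)) := by
            intro hcon
            omega
          rw [hval j hj1 hjn, if_neg hne, add_zero]
    -- unfold one iteration and rewrite each component
    rw [existenceLoopB]
    simp only [hv, hvc]
    rw [hval (k + 1) (by omega) (by omega)]
    rw [ht', hb', hleft]
    rw [ih _ _ (by omega) hcnt']
    rw [List.range_succ]
    simp only [List.all_append, List.all_cons, List.all_nil, Bool.and_true]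
    by_cases hc : condB deg (k + 1) = true
    · have hle := of_decide_eq_true hc
      rw [if_neg (not_lt.mpr hle), hc, Bool.and_true]
    · have hlt : ((k + 1 : Nat) : Int) * (((k + 1 : Nat) : Int) - 1)
          + ((deg.drop (k + 1)).map (fun x => min x ((k + 1 : Nat) : Int))).sum
          < (deg.take (k + 1)).sum := by
        by_contra hnc
        exact hc (decide_eq_true (not_lt.mp hnc))
      rw [if_pos hlt]
      rw [Bool.not_eq_true] at hc
      rw [hc]
      simp

lemma existence_eq_good (deg : List Int) : Existence deg = goodB deg := by
  unfold Existence goodB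
  by_cases hm : PySem.Int.mod deg.sum 2 = 0
  · rw [if_neg (not_not_intro hm), hm]
    have hA := loopA_range deg deg.length 1
    push_cast at hA
    rw [show (1 : Int) + (deg.length : Int) = (deg.length : Int) + 1 from add_comm 1 _] at hA
    rw [hA]
    have hfun : (fun i => condB deg (1 + i)) = (fun i => condB deg (i + 1)) := by
      funext i
      rw [Nat.add_comm]
    rw [hfun]
    simp
  · rw [if_pos hm]
    have hb : (PySem.Int.mod deg.sum 2 == 0) = false := beq_eq_false_iff_ne.mpr hm
    rw [hb, Bool.false_and]

lemma existence_alt_eq_good (deg : List Int) : Existence_alt deg = goodB deg := by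
  by_cases hnil : deg = []
  · subst hnil
    decide
  · have hpos : 0 < deg.length := List.length_pos_of_ne_nil hnil
    have hlen1 : deg.length - 1 + 1 = deg.length := by omega
    simp only [Existence_alt]
    unfold goodB
    by_cases hm : PySem.Int.mod deg.sum 2 = 0
    · rw [if_neg (not_not_intro hm)]
      have hcnt0 : CntOk deg deg.length (List.replicate (deg.length + 1) 0) (deg.length - 1 + 1) := by
        constructor
        · simp
        · intro j hj1 hjn
          rw [hlen1, List.drop_length]
          simp [List.getD_eq_getElem?_getD, List.getElem?_replicate]
          split <;> rfl
      have hB := loopB_spec deg (deg.length - 1) (List.replicate (deg.length + 1) 0)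
        (decide (deg.sum ≤ (deg.length : Int) * ((deg.length : Int) - 1))) (by omega) hcnt0
      rw [hlen1, List.drop_length, List.take_length] at hB
      simp only [List.map_nil, List.sum_nil, List.countP_nil, Nat.cast_zero] at hB
      rw [hB]
      have hcond : condB deg deg.length
          = decide (deg.sum ≤ (deg.length : Int) * ((deg.length : Int) - 1)) := by
        unfold condB
        rw [List.take_length, List.drop_length]
        simp
      have hrange : List.range deg.length = List.range (deg.length - 1) ++ [deg.length - 1] := by
        rw [← hlen1, List.range_succ, hlen1]
      rw [hrange]
      simp only [List.all_append, List.all_cons, List.all_nil, Bool.and_true, hlen1]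
      rw [← hcond]
      have hb : (PySem.Int.mod deg.sum 2 == 0) = true := by rw [hm]; rfl
      rw [hb, Bool.true_and, Bool.and_comm]
    · rw [if_pos hm]
      have hb : (PySem.Int.mod deg.sum 2 == 0) = false := beq_eq_false_iff_ne.mpr hm
      rw [hb, Bool.false_and]

-- ===== VERDICT (by name: the statement is the Claim_ definition above) =====
theorem Existence_spec : Claim_equal_Existence := by
  intro deg _
  unfold Spec_Existence
  rw [existence_eq_good, existence_alt_eq_good]
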